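-- pv_equiv track=rewrite | github.com/tushar1977/aoc-2025 | day2/main.py | part2
-- ===== SOURCE A (Python) =====
-- def part2(a, b):
--     ans = 0
--     for j in range(a, b + 1):
--         s = str(j)
--         for x in range(1, len(s)):
--             sub = s[:x]
--             if sub * (len(s) // len(sub)) == s:
--                 ans += int(s)
--     return ans
-- ===== SOURCE B (Python) =====
-- def part2(a, b):
--     # Enumerate repetition-structured numbers directly: for each total digit
--     # length L and proper divisor d of L, every number whose decimal string is a
--     # d-digit pattern repeated L//d times is p * rep where rep = (10**L-1)//(10**d-1)
--     # and p is the d-digit pattern; sum those that fall inside [a, b].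
--     total = 0
--     if b >= 10:
--         lmax, t = 1, b
--         while t >= 10:
--             t //= 10
--             lmax += 1
--         for L in range(2, lmax + 1):
--             for d in range(1, L):
--                 if L % d == 0:
--                     rep = (10 ** L - 1) // (10 ** d - 1)
--                     for p in range(10 ** (d - 1), 10 ** d):
--                         n = p * rep
--                         if a <= n <= b:
--                             total += n
--     return total
-- ===== Notes on version B (the rewrite author's own statement) =====
-- stated objective: faster
-- what changed: Instead of scanning every integer in [a,b] and testing each prefix of its decimal string by string multiplication, B enumerates only the repetition-structured numbers: for each digit length L and proper divisor d of L it runs over the d-digit patterns p and sums p*((10^L-1)//(10^d-1)) when it lands in [a,b]; intended as faster: a timing run measured 200-1400x on wide ranges at its largest sizes, though on near-empty ranges (both sub-millisecond) the ratio is noise-bound and one probe run recorded the label as unconfirmed.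
import Mathlib
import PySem

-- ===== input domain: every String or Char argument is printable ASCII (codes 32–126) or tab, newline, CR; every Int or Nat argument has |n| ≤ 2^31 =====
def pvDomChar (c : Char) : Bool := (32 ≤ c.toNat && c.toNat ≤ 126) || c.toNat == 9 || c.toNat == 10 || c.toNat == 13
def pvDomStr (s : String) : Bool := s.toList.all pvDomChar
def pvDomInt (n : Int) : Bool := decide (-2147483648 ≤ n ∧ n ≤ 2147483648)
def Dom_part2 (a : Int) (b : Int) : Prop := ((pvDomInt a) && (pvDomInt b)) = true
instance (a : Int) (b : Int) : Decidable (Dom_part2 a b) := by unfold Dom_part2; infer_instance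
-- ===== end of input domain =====

-- B replaces A's scan of every integer in [a,b] (testing each string prefix by string
-- multiplication) with an enumeration of only the repetition-structured numbers, per digit
-- length L, proper divisor d of L and d-digit pattern p. Intended as faster; the timing
-- run measured 200-1400x on wide ranges (near-empty ranges are sub-ms for both, noise-bound).

-- ===== PORT A =====
def part2 (a : Int) (b : Int) : Int :=
  (PySem.List.pyRange a (b + 1) 1).foldl (fun ans j =>
    let s : List Char := PySem.Int.toChars j      -- s = str(j), list side
    (PySem.List.pyRange 1 (PySem.List.len s) 1).foldl (fun ans x =>
      let sub := PySem.List.slice s (some 0) (some x)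
      if PySem.List.pyRepeat sub (PySem.Int.floordiv (PySem.List.len s) (PySem.List.len sub)) = s
      then ans + j    -- `ans += int(s)`: s is str(j) itself, so int(s) = j exactly (hand port)
      else ans) ans) 0

-- ===== PORT B =====
-- the `while t >= 10: t //= 10; lmax += 1` loop of Source B
def part2AltLmax (t : Int) (lmax : Int) : Int :=
  if 10 ≤ t then part2AltLmax (PySem.Int.floordiv t 10) (lmax + 1) else lmax
termination_by t.toNat
decreasing_by
  rw [PySem.Int.floordiv_eq_ediv_of_pos (by omega : (0:Int) < 10)]
  omega

def part2_alt (a : Int) (b : Int) : Int :=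
  if 10 ≤ b then
    (PySem.List.pyRange 2 (part2AltLmax b 1 + 1) 1).foldl (fun total L =>
      (PySem.List.pyRange 1 L 1).foldl (fun total d =>
        if PySem.Int.mod L d = 0 then
          -- 10 ** e ported as 10 ^ e.toNat (exact: every exponent here is nonnegative)
          let rep := PySem.Int.floordiv (10 ^ L.toNat - 1) (10 ^ d.toNat - 1)
          (PySem.List.pyRange (10 ^ (d - 1).toNat) (10 ^ d.toNat) 1).foldl (fun total p =>
            let n := p * rep
            if a ≤ n ∧ n ≤ b then total + n else total) total
        else total) total) 0
  else 0

-- ===== PRECONDITION & SPEC =====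
def Spec_part2 (a : Int) (b : Int) (out : Int) : Prop := out = part2_alt a b
instance (a : Int) (b : Int) (out : Int) : Decidable (Spec_part2 a b out) := by unfold Spec_part2; infer_instance

-- ===== CLAIM (what is proved, stated in full; the proofs are below) =====
def Claim_equal_part2 : Prop := ∀ (a : Int) (b : Int), Dom_part2 a b → Spec_part2 a b (part2 a b)


-- ===== LEMMAS AND PROOFS =====

-- number of decimal digits of j (0 for j ≤ 0)
def dlen (j : Int) : Nat := (Nat.digits 10 j.toNat).length

-- the repetition condition A tests on a decimal string s with prefix length x
abbrev RC (s : List Char) (x : Nat) : Prop :=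
  (List.replicate (s.length / x) (s.take x)).flatten = s

-- 1 + 10^d + 10^(2d) + … + 10^((k-1)d)
def repN (d : Nat) : Nat → Nat
  | 0 => 0
  | k + 1 => 1 + 10 ^ d * repN d k

theorem repN_pos (d k : Nat) (hk : 0 < k) : 0 < repN d k := by
  cases k with
  | zero => omega
  | succ k => simp [repN]

theorem repN_mul (d k : Nat) : (10 ^ d - 1) * repN d k = 10 ^ (d * k) - 1 := by
  induction k with
  | zero => simp [repN]
  | succ k ih =>
    have hA : (1:Nat) ≤ 10 ^ d := Nat.one_le_pow _ _ (by omega)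
    have hB : (1:Nat) ≤ 10 ^ (d * k) := Nat.one_le_pow _ _ (by omega)
    have hC : (1:Nat) ≤ 10 ^ (d * (k + 1)) := Nat.one_le_pow _ _ (by omega)
    simp only [repN]
    zify [hA, hB] at ih
    zify [hA, hC]
    rw [show d * (k + 1) = d + d * k by ring, pow_add]
    linear_combination (10:Int) ^ d * ih

-- ---------- fold-to-sum conversion ----------

theorem sum_Ico_succ_top_int {M : Type} [AddCommMonoid M] {a b : Int} (hab : a ≤ b) (f : Int → M) :
    (∑ k ∈ Finset.Ico a (b + 1), f k) = (∑ k ∈ Finset.Ico a b, f k) + f b := by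
  have h : Finset.Ico a (b + 1) = insert b (Finset.Ico a b) := by
    ext x; simp only [Finset.mem_Ico, Finset.mem_insert]; omega
  rw [h, Finset.sum_insert (by simp), add_comm]

theorem pyRange_foldl_sum (g : Int → Int) (a b : Int) (acc : Int) :
    (PySem.List.pyRange a b 1).foldl (fun acc j => acc + g j) acc
      = acc + ∑ j ∈ Finset.Ico a b, g j := by
  rw [PySem.List.foldl_add]
  congr 1
  suffices h : ∀ (n : Nat) (b : Int), (b - a).toNat = n →
      ((PySem.List.pyRange a b 1).map g).sum = ∑ j ∈ Finset.Ico a b, g j from h _ b rfl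
  intro n
  induction n with
  | zero =>
    intro b hb
    rw [PySem.List.pyRange_one_eq_nil (by omega), Finset.Ico_eq_empty (by omega)]
    simp
  | succ n ih =>
    intro b hb
    have hab : a ≤ b - 1 := by omega
    have hb1 : b = (b - 1) + 1 := by omega
    rw [hb1, PySem.List.pyRange_one_succ_right hab, sum_Ico_succ_top_int hab]
    rw [List.map_append, List.sum_append, ih (b - 1) (by omega)]
    simp

-- ---------- decimal-string structure ----------

theorem toDigitsCore_eq (f : Nat) : ∀ (n : Nat) (acc : List Char), n ≠ 0 → n < f →
    Nat.toDigitsCore 10 f n acc = ((Nat.digits 10 n).map Nat.digitChar).reverse ++ acc := by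
  induction f with
  | zero => intro n acc h0 hf; omega
  | succ f ih =>
    intro n acc h0 hf
    by_cases hq : n / 10 = 0
    · have hlt : n < 10 := by omega
      rw [Nat.digits_of_lt 10 n h0 hlt]
      simp [Nat.toDigitsCore, hq, Nat.mod_eq_of_lt hlt]
    · rw [Nat.digits_def' (by norm_num : (1:Nat) < 10) (show 0 < n by omega)]
      simp only [Nat.toDigitsCore, hq, if_false]
      rw [ih (n / 10) _ hq (by omega)]
      simp

theorem toChars_pos (j : Int) (hj : 0 < j) :
    PySem.Int.toChars j = ((Nat.digits 10 j.toNat).map Nat.digitChar).reverse := by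
  unfold PySem.Int.toChars
  rw [if_neg (by omega)]
  have h0 : j.toNat ≠ 0 := by omega
  unfold Nat.toDigits
  rw [toDigitsCore_eq _ _ _ h0 (by omega)]
  simp

theorem len_toChars_pos (j : Int) (hj : 0 < j) : (PySem.Int.toChars j).length = dlen j := by
  rw [toChars_pos j hj]; simp [dlen]

theorem len_toChars_small (j : Int) (h0 : 0 ≤ j) (h : j < 10) : (PySem.Int.toChars j).length = 1 := by
  interval_cases j <;> decide

theorem toChars_neg (j : Int) (hj : j < 0) :
    PySem.Int.toChars j = '-' :: ((Nat.digits 10 j.natAbs).map Nat.digitChar).reverse := by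
  unfold PySem.Int.toChars
  rw [if_pos hj]
  have h0 : j.natAbs ≠ 0 := by omega
  unfold Nat.toDigits
  rw [toDigitsCore_eq _ _ _ h0 (by omega)]
  simp

theorem digitChar_ne_dash (d : Nat) (hd : d < 10) : Nat.digitChar d ≠ '-' := by
  interval_cases d <;> decide

theorem map_digitChar_inj : ∀ (u v : List Nat), (∀ x ∈ u, x < 10) → (∀ x ∈ v, x < 10) →
    u.map Nat.digitChar = v.map Nat.digitChar → u = v := by
  intro u
  induction u with
  | nil => intro v _ _ h; cases v <;> simp_all
  | cons a u ih =>
    intro v hu hv h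
    cases v with
    | nil => simp at h
    | cons c v =>
      simp only [List.map_cons, List.cons.injEq] at h
      have ha : a < 10 := hu a (by simp)
      have hc : c < 10 := hv c (by simp)
      have key : ∀ x y : Fin 10, Nat.digitChar x.val = Nat.digitChar y.val → x = y := by decide
      have hac : a = c := by
        have := key ⟨a, ha⟩ ⟨c, hc⟩ h.1
        simpa using congrArg Fin.val this
      subst hac
      rw [ih v (fun x hx => hu x (by simp [hx])) (fun x hx => hv x (by simp [hx])) h.2]

-- ---------- replicate/flatten toolbox ----------

theorem flatten_replicate_comm {α : Type} (k : Nat) (P : List α) :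
    (List.replicate k P).flatten ++ P = P ++ (List.replicate k P).flatten := by
  induction k with
  | zero => simp
  | succ k ih =>
    simp only [List.replicate_succ, List.flatten_cons]
    rw [List.append_assoc, ih, ← List.append_assoc]

theorem reverse_flatten_replicate {α : Type} (k : Nat) (P : List α) :
    ((List.replicate k P).flatten).reverse = (List.replicate k P.reverse).flatten := by
  induction k with
  | zero => simp
  | succ k ih =>
    simp only [List.replicate_succ, List.flatten_cons, List.reverse_append]
    rw [ih, flatten_replicate_comm]

theorem length_flatten_replicate {α : Type} (k : Nat) (P : List α) :
    ((List.replicate k P).flatten).length = k * P.length := by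
  induction k with
  | zero => simp
  | succ k ih =>
    simp only [List.replicate_succ, List.flatten_cons, List.length_append, ih]
    ring

theorem mem_flatten_replicate {α : Type} (k : Nat) (P : List α) (x : α)
    (hx : x ∈ (List.replicate k P).flatten) : x ∈ P := by
  rw [List.mem_flatten] at hx
  obtain ⟨l, hl, hxl⟩ := hx
  rwa [List.eq_of_mem_replicate hl] at hxl

theorem take_flatten_replicate {α : Type} (k : Nat) (P : List α) (hk : 0 < k) :
    ((List.replicate k P).flatten).take P.length = P := by
  cases k with
  | zero => omega
  | succ k =>
    simp only [List.replicate_succ, List.flatten_cons]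
    rw [List.take_left]

theorem getLast?_flatten_replicate {α : Type} (k : Nat) (P : List α) (hk : 0 < k) :
    ((List.replicate k P).flatten).getLast? = P.getLast? := by
  induction k with
  | zero => omega
  | succ k ih =>
    rcases Nat.eq_zero_or_pos k with rfl | hk'
    · simp
    rcases List.eq_nil_or_concat P with rfl | _
    · simp
    have hne : (List.replicate k P).flatten ≠ [] := by
      intro hc
      have := congrArg List.length hc
      rw [length_flatten_replicate] at this
      simp at this
      rcases this with h | h
      · omega
      · simp [h] at *
    simp only [List.replicate_succ, List.flatten_cons]
    rw [List.getLast?_append_of_ne_nil _ hne, ih hk']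

theorem map_flatten_replicate {α β : Type} (g : α → β) (k : Nat) (P : List α) :
    ((List.replicate k P).flatten).map g = (List.replicate k (P.map g)).flatten := by
  induction k with
  | zero => simp
  | succ k ih =>
    simp only [List.replicate_succ, List.flatten_cons, List.map_append, ih]

theorem ofDigits_flatten_replicate (k : Nat) (F : List Nat) :
    Nat.ofDigits 10 ((List.replicate k F).flatten) = Nat.ofDigits 10 F * repN F.length k := by
  induction k with
  | zero => simp [repN]
  | succ k ih =>
    simp only [List.replicate_succ, List.flatten_cons]
    rw [Nat.ofDigits_append, ih]
    simp only [repN]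
    ring

-- ---------- pattern numbers ----------

theorem digits_len_of_range (d p : Nat) (hd : 0 < d) (h1 : 10 ^ (d - 1) ≤ p) (h2 : p < 10 ^ d) :
    (Nat.digits 10 p).length = d := by
  have hle : (Nat.digits 10 p).length ≤ d := (Nat.digits_length_le_iff (by norm_num) p).mpr h2
  have hlt : d - 1 < (Nat.digits 10 p).length := (Nat.lt_digits_length_iff (by norm_num) p).mpr h1
  omega

theorem digits_pattern (d k p : Nat) (hd : 0 < d) (h1 : 10 ^ (d - 1) ≤ p) (h2 : p < 10 ^ d) :
    Nat.digits 10 (p * repN d k) = (List.replicate k (Nat.digits 10 p)).flatten := by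
  induction k with
  | zero => simp [repN]
  | succ k ih =>
    have hlen := digits_len_of_range d p hd h1 h2
    have hstep : p * repN d (k + 1) = p + 10 ^ (Nat.digits 10 p).length * (p * repN d k) := by
      rw [hlen]; simp only [repN]; ring
    rw [hstep, ← Nat.digits_append_digits (by norm_num), ih]
    simp [List.replicate_succ]

-- the backward direction: every pattern number of shape (d, k, p) has length d*k and satisfies RC at d
theorem char_bwd (d k p : Nat) (hd : 0 < d) (hk : 0 < k) (h1 : 10 ^ (d - 1) ≤ p) (h2 : p < 10 ^ d) :
    dlen ((p * repN d k : Nat) : Int) = d * k ∧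
      RC (PySem.Int.toChars ((p * repN d k : Nat) : Int)) d := by
  have hp0 : 0 < p := lt_of_lt_of_le (by positivity) h1
  have hn0 : 0 < p * repN d k := Nat.mul_pos hp0 (repN_pos d k hk)
  have htn : ((p * repN d k : Nat) : Int).toNat = p * repN d k := Int.toNat_natCast _
  have hdig : Nat.digits 10 (p * repN d k) = (List.replicate k (Nat.digits 10 p)).flatten :=
    digits_pattern d k p hd h1 h2
  have hplen := digits_len_of_range d p hd h1 h2
  constructor
  · unfold dlen
    rw [htn, hdig, length_flatten_replicate, hplen]
    ring
  · have hpos : (0:Int) < ((p * repN d k : Nat) : Int) := by exact_mod_cast hn0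
    rw [toChars_pos _ hpos, htn, hdig, map_flatten_replicate, reverse_flatten_replicate]
    have hPlen : (((Nat.digits 10 p).map Nat.digitChar).reverse).length = d := by simp [hplen]
    show (List.replicate (((List.replicate k (((Nat.digits 10 p).map Nat.digitChar).reverse)).flatten).length / d)
      (((List.replicate k (((Nat.digits 10 p).map Nat.digitChar).reverse)).flatten).take d)).flatten = _
    rw [length_flatten_replicate, hPlen, Nat.mul_div_cancel _ hd, ← hPlen,
      take_flatten_replicate k _ hk]

theorem RC_dvd (s : List Char) (x : Nat) (hx : 0 < x) (hxL : x < s.length) (h : RC s x) :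
    x ∣ s.length ∧ 2 ≤ s.length / x := by
  have htake : (s.take x).length = x := by rw [List.length_take]; omega
  have hlen := congrArg List.length h
  rw [length_flatten_replicate, htake] at hlen
  refine ⟨Dvd.intro_left _ hlen, ?_⟩
  rcases Nat.lt_or_ge (s.length / x) 2 with hq | hq
  · rcases Nat.le_one_iff_eq_zero_or_eq_one.mp (Nat.lt_succ_iff.mp hq) with h0 | h0 <;>
      rw [h0] at hlen <;> omega
  · exact hq

-- the forward direction: A's repetition test forces the pattern-number shape
theorem char_fwd (j : Int) (hj : 10 ≤ j) (d : Nat) (hd : 0 < d)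
    (hdL : d < (PySem.Int.toChars j).length) (h : RC (PySem.Int.toChars j) d) :
    ∃ p : Nat, 10 ^ (d - 1) ≤ p ∧ p < 10 ^ d ∧
      j = (p : Int) * (repN d ((PySem.Int.toChars j).length / d) : Nat) := by
  have hj0 : (0:Int) < j := by omega
  have hs : PySem.Int.toChars j = ((Nat.digits 10 j.toNat).map Nat.digitChar).reverse :=
    toChars_pos j hj0
  have hL : (PySem.Int.toChars j).length = (Nat.digits 10 j.toNat).length := by rw [hs]; simp
  obtain ⟨hdvd, hk2⟩ := RC_dvd _ d hd hdL h
  have hk0 : 0 < (PySem.Int.toChars j).length / d := by omega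
  have hrev : (List.replicate ((PySem.Int.toChars j).length / d)
      (((PySem.Int.toChars j).take d).reverse)).flatten = (Nat.digits 10 j.toNat).map Nat.digitChar := by
    rw [← reverse_flatten_replicate, h, hs, List.reverse_reverse]
  have htdlen : ((PySem.Int.toChars j).take d).length = d := by rw [List.length_take]; omega
  have hQ : ((Nat.digits 10 j.toNat).map Nat.digitChar).take d =
      ((PySem.Int.toChars j).take d).reverse := by
    have htk := take_flatten_replicate ((PySem.Int.toChars j).length / d)
      (((PySem.Int.toChars j).take d).reverse) hk0
    rw [List.length_reverse, htdlen] at htk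
    rw [← hrev, htk]
  have hQF : ((Nat.digits 10 j.toNat).map Nat.digitChar).take d =
      ((Nat.digits 10 j.toNat).take d).map Nat.digitChar := (List.map_take ..).symm
  have hDjlt : ∀ y ∈ Nat.digits 10 j.toNat, y < 10 := fun y hy => Nat.digits_lt_base (by norm_num) hy
  have hFlt : ∀ y ∈ (Nat.digits 10 j.toNat).take d, y < 10 :=
    fun y hy => hDjlt y (List.mem_of_mem_take hy)
  have hflatlt : ∀ y ∈ (List.replicate ((PySem.Int.toChars j).length / d)
      ((Nat.digits 10 j.toNat).take d)).flatten, y < 10 :=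
    fun y hy => hFlt y (mem_flatten_replicate _ _ _ hy)
  have hDeq : Nat.digits 10 j.toNat = (List.replicate ((PySem.Int.toChars j).length / d)
      ((Nat.digits 10 j.toNat).take d)).flatten := by
    apply map_digitChar_inj _ _ hDjlt hflatlt
    rw [map_flatten_replicate, ← hQF, hQ, hrev]
  have hFlen : ((Nat.digits 10 j.toNat).take d).length = d := by rw [List.length_take]; omega
  have hFne : (Nat.digits 10 j.toNat).take d ≠ [] := by
    intro hc; rw [hc] at hFlen; simp at hFlen; omega
  have hDne : Nat.digits 10 j.toNat ≠ [] := by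
    intro hc; rw [hc] at hL; simp only [List.length_nil] at hL; omega
  have hlast? : (Nat.digits 10 j.toNat).getLast? = ((Nat.digits 10 j.toNat).take d).getLast? := by
    conv_lhs => rw [hDeq]
    exact getLast?_flatten_replicate _ _ hk0
  have hgl : (Nat.digits 10 j.toNat).getLast hDne ≠ 0 :=
    Nat.getLast_digit_ne_zero 10 (show j.toNat ≠ 0 by omega)
  have hFlast : ((Nat.digits 10 j.toNat).take d).getLast hFne ≠ 0 := by
    rw [List.getLast?_eq_some_getLast hDne, List.getLast?_eq_some_getLast hFne] at hlast?
    intro hc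
    exact hgl (by rw [Option.some_inj.mp hlast?, hc])
  have hdigp : Nat.digits 10 (Nat.ofDigits 10 ((Nat.digits 10 j.toNat).take d)) =
      (Nat.digits 10 j.toNat).take d :=
    Nat.digits_ofDigits 10 (by norm_num) _ hFlt (fun _ => hFlast)
  refine ⟨Nat.ofDigits 10 ((Nat.digits 10 j.toNat).take d), ?_, ?_, ?_⟩
  · exact (Nat.lt_digits_length_iff (by norm_num) _).mp (by rw [hdigp, hFlen]; omega)
  · exact (Nat.digits_length_le_iff (by norm_num) _).mp (by rw [hdigp, hFlen])
  · have hval : j.toNat = Nat.ofDigits 10 ((Nat.digits 10 j.toNat).take d) *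
        repN d ((PySem.Int.toChars j).length / d) := by
      conv_lhs => rw [← Nat.ofDigits_digits 10 j.toNat, hDeq]
      rw [ofDigits_flatten_replicate, hFlen]
    have hjc : j = (j.toNat : Int) := by omega
    conv_lhs => rw [hjc, hval]
    push_cast
    ring

theorem RC_neg (j : Int) (hj : j < 0) (x : Nat) (hx : 0 < x)
    (hxL : x < (PySem.Int.toChars j).length) : ¬ RC (PySem.Int.toChars j) x := by
  intro h
  have hj' : j.natAbs ≠ 0 := by omega
  have hs : PySem.Int.toChars j = '-' :: ((Nat.digits 10 j.natAbs).map Nat.digitChar).reverse :=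
    toChars_neg j hj
  obtain ⟨hdvd, hk2⟩ := RC_dvd _ x hx hxL h
  obtain ⟨k, hkk⟩ : ∃ k', (PySem.Int.toChars j).length / x = k' + 2 :=
    ⟨(PySem.Int.toChars j).length / x - 2, by omega⟩
  have h' : (List.replicate (k + 2) ((PySem.Int.toChars j).take x)).flatten =
      PySem.Int.toChars j := by rw [← hkk]; exact h
  have hPlen : ((PySem.Int.toChars j).take x).length = x := by rw [List.length_take]; omega
  have hM : PySem.Int.toChars j = (PySem.Int.toChars j).take x ++
      (List.replicate (k + 1) ((PySem.Int.toChars j).take x)).flatten := by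
    conv_lhs => rw [← h']
    simp [List.replicate_succ]
  have hdrop : (PySem.Int.toChars j).drop x =
      (List.replicate (k + 1) ((PySem.Int.toChars j).take x)).flatten := by
    conv_lhs => rw [hM]
    exact List.drop_left' hPlen
  have htk : ((PySem.Int.toChars j).drop x).take x = (PySem.Int.toChars j).take x := by
    have h2 := take_flatten_replicate (k + 1) ((PySem.Int.toChars j).take x) (by omega)
    rw [hPlen] at h2
    rw [hdrop, h2]
  -- hence the character at position x equals the character at position 0, which is '-'
  have hx0 : (PySem.Int.toChars j)[x]? = some '-' := by
    have e1 : (PySem.Int.toChars j)[x]? = ((PySem.Int.toChars j).drop x)[0]? := by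
      rw [List.getElem?_drop]; norm_num
    have e2 : (((PySem.Int.toChars j).drop x).take x)[0]? = ((PySem.Int.toChars j).drop x)[0]? :=
      List.getElem?_take_of_lt (by omega)
    have e3 : (((PySem.Int.toChars j).take x))[0]? = (PySem.Int.toChars j)[0]? :=
      List.getElem?_take_of_lt (by omega)
    rw [e1, ← e2, htk, e3, hs]
    rfl
  -- but position x lies inside the digit part
  have hx1 : (PySem.Int.toChars j)[x]? =
      (((Nat.digits 10 j.natAbs).map Nat.digitChar).reverse)[x - 1]? := by
    rw [hs, show x = (x - 1) + 1 by omega, List.getElem?_cons_succ]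
    congr 1
  have hmem : '-' ∈ ((Nat.digits 10 j.natAbs).map Nat.digitChar).reverse := by
    rw [hx1] at hx0
    exact List.mem_of_getElem? hx0
  rw [List.mem_reverse, List.mem_map] at hmem
  obtain ⟨y, hy, hyc⟩ := hmem
  exact digitChar_ne_dash y (Nat.digits_lt_base (by norm_num) hy) hyc

-- ---------- the B-side helpers ----------

theorem lmax_eq (t : Int) : 1 ≤ t → ∀ m : Int, part2AltLmax t m = m + (dlen t : Int) - 1 := by
  suffices H : ∀ (n : Nat) (t : Int), t.toNat = n → 1 ≤ t → ∀ m : Int,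
      part2AltLmax t m = m + (dlen t : Int) - 1 from fun ht m => H t.toNat t rfl ht m
  intro n
  induction n using Nat.strong_induction_on with
  | _ n ih =>
    intro t hn ht m
    by_cases h10 : 10 ≤ t
    · rw [part2AltLmax, if_pos h10,
        PySem.Int.floordiv_eq_ediv_of_pos (by omega : (0:Int) < 10)]
      rw [ih (t / 10).toNat (by omega) (t / 10) rfl (by omega) (m + 1)]
      have hstep : dlen t = dlen (t / 10) + 1 := by
        unfold dlen
        rw [show (t / 10).toNat = t.toNat / 10 by omega]
        rw [Nat.digits_def' (by norm_num : (1:Nat) < 10) (show 0 < t.toNat by omega)]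
        simp
      rw [hstep]
      push_cast
      ring
    · rw [part2AltLmax, if_neg h10]
      have h1 : dlen t = 1 := by
        unfold dlen
        rw [Nat.digits_of_lt 10 t.toNat (by omega) (by omega)]
        rfl
      rw [h1]
      push_cast
      ring

theorem rep_floordiv (d L : Nat) (hd : 0 < d) (hdvd : d ∣ L) :
    PySem.Int.floordiv (10 ^ L - 1) (10 ^ d - 1) = (repN d (L / d) : Nat) := by
  obtain ⟨k, rfl⟩ := hdvd
  have hA : (1:Nat) ≤ 10 ^ d := Nat.one_le_pow _ _ (by norm_num)
  have hB : (1:Nat) ≤ 10 ^ (d * k) := Nat.one_le_pow _ _ (by norm_num)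
  have hmul := repN_mul d k
  zify [hA, hB] at hmul
  have hk : d * k / d = k := by
    rw [Nat.mul_div_cancel_left _ hd]
  rw [hk]
  have hpos : (0:Int) < 10 ^ d - 1 := by
    have : (10:Int) ^ 1 ≤ 10 ^ d := pow_le_pow_right₀ (by norm_num) hd
    simp at this
    omega
  rw [PySem.Int.floordiv_eq_ediv_of_pos hpos, ← hmul,
    Int.mul_ediv_cancel_left _ (by omega)]

-- ---------- port shapes as Finset sums ----------

theorem inner_A (s : List Char) (j : Int) (acc : Int) :
    (PySem.List.pyRange 1 (PySem.List.len s) 1).foldl (fun ans x =>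
      if PySem.List.pyRepeat (PySem.List.slice s (some 0) (some x))
          (PySem.Int.floordiv (PySem.List.len s) (PySem.List.len (PySem.List.slice s (some 0) (some x)))) = s
      then ans + j else ans) acc
    = acc + ∑ x ∈ Finset.Ico (1 : Int) (s.length : Int), (if RC s x.toNat then j else 0) := by
  rw [PySem.List.foldl_congr_mem _ _
    (fun ans x => ans + (if RC s x.toNat then j else 0)) acc ?_]
  · rw [pyRange_foldl_sum, PySem.List.len_eq]
  · intro ans x hxmem
    rw [PySem.List.len_eq] at hxmem
    have hx := (PySem.List.mem_pyRange_one).mp hxmem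
    have h0 : (0:Int) ≤ x := by omega
    have hxl : x.toNat < s.length := by omega
    have hslice : PySem.List.slice s (some 0) (some x) = s.take x.toNat := by
      rw [PySem.List.slice_zero_start]
      exact PySem.List.slice_to s h0
    have hlen : PySem.List.len (s.take x.toNat) = x := by
      rw [PySem.List.len_eq, List.length_take]
      omega
    have hfd : PySem.Int.floordiv (PySem.List.len s) x = ((s.length / x.toNat : Nat) : Int) := by
      rw [PySem.List.len_eq, show x = ((x.toNat : Nat) : Int) by omega]
      exact_mod_cast PySem.Int.floordiv_natCast s.length x.toNat
    have hcond : (PySem.List.pyRepeat (PySem.List.slice s (some 0) (some x))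
        (PySem.Int.floordiv (PySem.List.len s)
          (PySem.List.len (PySem.List.slice s (some 0) (some x)))) = s) ↔ RC s x.toNat := by
      rw [hslice, hlen, hfd]
      unfold PySem.List.pyRepeat
      rw [Int.toNat_natCast]
    by_cases hc : RC s x.toNat
    · rw [if_pos (hcond.mpr hc)]
      simp [hc]
    · rw [if_neg (fun hcc => hc (hcond.mp hcc))]
      simp [hc]

theorem A_sum (a b : Int) :
    part2 a b = ∑ j ∈ Finset.Ico a (b + 1),
      ∑ x ∈ Finset.Ico (1 : Int) ((PySem.Int.toChars j).length : Int),
        (if RC (PySem.Int.toChars j) x.toNat then j else 0) := by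
  unfold part2
  rw [PySem.List.foldl_congr_mem _ _
    (fun ans j => ans + ∑ x ∈ Finset.Ico (1 : Int) ((PySem.Int.toChars j).length : Int),
      (if RC (PySem.Int.toChars j) x.toNat then j else 0)) 0
    (fun acc j _ => inner_A (PySem.Int.toChars j) j acc)]
  rw [pyRange_foldl_sum]
  simp


theorem p_loop (a b rep lo hi acc : Int) :
    (PySem.List.pyRange lo hi 1).foldl (fun total p =>
      if a ≤ p * rep ∧ p * rep ≤ b then total + p * rep else total) acc
    = acc + ∑ p ∈ Finset.Ico lo hi, (if a ≤ p * rep ∧ p * rep ≤ b then p * rep else 0) := by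
  rw [PySem.List.foldl_congr_mem _ _
    (fun total p => total + (if a ≤ p * rep ∧ p * rep ≤ b then p * rep else 0)) acc
    (fun acc' p _ => by by_cases hc : a ≤ p * rep ∧ p * rep ≤ b <;> simp [hc])]
  rw [pyRange_foldl_sum]

theorem d_loop (a b L acc : Int) (hL2 : 2 ≤ L) :
    (PySem.List.pyRange 1 L 1).foldl (fun total d =>
      if PySem.Int.mod L d = 0 then
        (PySem.List.pyRange (10 ^ (d - 1).toNat) (10 ^ d.toNat) 1).foldl (fun total p =>
          if a ≤ p * PySem.Int.floordiv (10 ^ L.toNat - 1) (10 ^ d.toNat - 1) ∧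
             p * PySem.Int.floordiv (10 ^ L.toNat - 1) (10 ^ d.toNat - 1) ≤ b
          then total + p * PySem.Int.floordiv (10 ^ L.toNat - 1) (10 ^ d.toNat - 1)
          else total) total
      else total) acc
    = acc + ∑ d ∈ Finset.Ico (1 : Int) L,
        (if d ∣ L then
          ∑ p ∈ Finset.Ico ((10 ^ (d.toNat - 1) : Nat) : Int) ((10 ^ d.toNat : Nat) : Int),
            (if a ≤ p * ((repN d.toNat (L.toNat / d.toNat) : Nat) : Int) ∧
                p * ((repN d.toNat (L.toNat / d.toNat) : Nat) : Int) ≤ b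
             then p * ((repN d.toNat (L.toNat / d.toNat) : Nat) : Int) else 0)
         else 0) := by
  rw [PySem.List.foldl_congr_mem _ _
    (fun total d => total + (if d ∣ L then
      ∑ p ∈ Finset.Ico ((10 ^ (d.toNat - 1) : Nat) : Int) ((10 ^ d.toNat : Nat) : Int),
        (if a ≤ p * ((repN d.toNat (L.toNat / d.toNat) : Nat) : Int) ∧
            p * ((repN d.toNat (L.toNat / d.toNat) : Nat) : Int) ≤ b
         then p * ((repN d.toNat (L.toNat / d.toNat) : Nat) : Int) else 0)
     else 0)) acc ?_]
  · rw [pyRange_foldl_sum]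
  · intro acc' d hdmem
    have hd := (PySem.List.mem_pyRange_one).mp hdmem
    by_cases hm : PySem.Int.mod L d = 0
    · have hdvd : d ∣ L := (PySem.Int.mod_eq_zero_iff_dvd L d).mp hm
      have hdvd' : d.toNat ∣ L.toNat := Int.natCast_dvd_natCast.mp
        (by rw [Int.toNat_of_nonneg (by omega : (0:Int) ≤ d),
                Int.toNat_of_nonneg (by omega : (0:Int) ≤ L)]; exact hdvd)
      have hrep : PySem.Int.floordiv (10 ^ L.toNat - 1) (10 ^ d.toNat - 1)
          = ((repN d.toNat (L.toNat / d.toNat) : Nat) : Int) :=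
        rep_floordiv d.toNat L.toNat (by omega) hdvd'
      have hb1 : ((10:Int) ^ (d - 1).toNat) = ((10 ^ (d.toNat - 1) : Nat) : Int) := by
        rw [show (d - 1).toNat = d.toNat - 1 by omega]
        push_cast
        ring
      have hb2 : ((10:Int) ^ d.toNat) = ((10 ^ d.toNat : Nat) : Int) := by push_cast; ring
      rw [if_pos hm, hrep, hb1, hb2, p_loop]
      simp [hdvd]
    · have hnd : ¬ d ∣ L := fun hc => hm ((PySem.Int.mod_eq_zero_iff_dvd L d).mpr hc)
      rw [if_neg hm]
      simp [hnd]

theorem B_sum (a b : Int) (hb : 10 ≤ b) :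
    part2_alt a b = ∑ L ∈ Finset.Ico (2 : Int) ((dlen b : Int) + 1),
      ∑ d ∈ Finset.Ico (1 : Int) L,
        (if d ∣ L then
          ∑ p ∈ Finset.Ico ((10 ^ (d.toNat - 1) : Nat) : Int) ((10 ^ d.toNat : Nat) : Int),
            (if a ≤ p * ((repN d.toNat (L.toNat / d.toNat) : Nat) : Int) ∧
                p * ((repN d.toNat (L.toNat / d.toNat) : Nat) : Int) ≤ b
             then p * ((repN d.toNat (L.toNat / d.toNat) : Nat) : Int) else 0)
         else 0) := by
  unfold part2_alt
  rw [if_pos hb, lmax_eq b (by omega) 1,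
    show (1 + (dlen b : Int) - 1 + 1) = ((dlen b : Int) + 1) by ring]
  rw [PySem.List.foldl_congr_mem _ _
    (fun total L => total + ∑ d ∈ Finset.Ico (1 : Int) L,
      (if d ∣ L then
        ∑ p ∈ Finset.Ico ((10 ^ (d.toNat - 1) : Nat) : Int) ((10 ^ d.toNat : Nat) : Int),
          (if a ≤ p * ((repN d.toNat (L.toNat / d.toNat) : Nat) : Int) ∧
              p * ((repN d.toNat (L.toNat / d.toNat) : Nat) : Int) ≤ b
           then p * ((repN d.toNat (L.toNat / d.toNat) : Nat) : Int) else 0)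
       else 0)) 0 ?_]
  · rw [pyRange_foldl_sum]
    simp
  · intro acc L hLmem
    have hL := (PySem.List.mem_pyRange_one).mp hLmem
    exact d_loop a b L acc (by omega)

-- ---------- the rearrangement ----------

theorem small_j_zero (j : Int) (hj : j < 10) :
    ∑ x ∈ Finset.Ico (1 : Int) ((PySem.Int.toChars j).length : Int),
      (if RC (PySem.Int.toChars j) x.toNat then j else 0) = 0 := by
  rcases lt_or_ge j 0 with hneg | hge
  · apply Finset.sum_eq_zero
    intro x hx
    simp only [Finset.mem_Ico] at hx
    rw [if_neg (RC_neg j hneg x.toNat (by omega) (by omega))]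
  · have hlen := len_toChars_small j hge hj
    apply Finset.sum_eq_zero
    intro x hx
    simp only [Finset.mem_Ico] at hx
    rw [hlen] at hx
    omega

theorem R1 (b j : Int) (hb : 10 ≤ b) (hj : j ≤ b) :
    ∑ x ∈ Finset.Ico (1 : Int) ((PySem.Int.toChars j).length : Int),
      (if RC (PySem.Int.toChars j) x.toNat then j else 0)
    = ∑ L ∈ Finset.Ico (2 : Int) ((dlen b : Int) + 1),
        ∑ d ∈ Finset.Ico (1 : Int) L,
          (if d ∣ L then (if (dlen j : Int) = L ∧ RC (PySem.Int.toChars j) d.toNat then j else 0) else 0) := by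
  rcases lt_or_ge j 10 with hsmall | hbig
  · rw [small_j_zero j hsmall]
    symm
    apply Finset.sum_eq_zero
    intro L hL
    simp only [Finset.mem_Ico] at hL
    apply Finset.sum_eq_zero
    intro d hd
    have hdl : dlen j ≤ 1 := by
      have hlt : j.toNat < 10 := by omega
      unfold dlen
      exact (Nat.digits_length_le_iff (by norm_num) _).mpr (by simpa using hlt)
    have hne : ¬ ((dlen j : Int) = L ∧ RC (PySem.Int.toChars j) d.toNat) := by
      rintro ⟨h1, -⟩
      omega
    by_cases hdd : d ∣ L <;> simp [hdd, hne]
  · have hj0 : (0:Int) < j := by omega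
    have hlen : (PySem.Int.toChars j).length = dlen j := len_toChars_pos j hj0
    have hd2 : 2 ≤ dlen j := by
      have h10 : 10 ≤ j.toNat := by omega
      have h := (Nat.lt_digits_length_iff (k := 1) (by norm_num : (1:Nat) < 10) j.toNat).mpr
        (by simpa using h10)
      unfold dlen
      omega
    have hdb : dlen j ≤ dlen b := by
      unfold dlen
      exact Nat.le_length_digits_le 10 _ _ (by omega)
    symm
    rw [Finset.sum_eq_single_of_mem ((dlen j : Int))
      (by simp only [Finset.mem_Ico]; omega) ?_]
    · symm
      apply Finset.sum_congr (by rw [hlen])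
      intro x hx
      simp only [Finset.mem_Ico] at hx
      by_cases hc : RC (PySem.Int.toChars j) x.toNat
      · have hxL : x.toNat < (PySem.Int.toChars j).length := by rw [hlen]; omega
        have hdvd := (RC_dvd _ x.toNat (by omega) hxL hc).1
        have hdvdi : x ∣ (dlen j : Int) := by
          rw [show x = (x.toNat : Int) by omega]
          rw [← hlen]
          exact_mod_cast hdvd
        simp [hdvdi]
      · simp [hc]
    · intro L' hL' hne
      apply Finset.sum_eq_zero
      intro d hd
      have hni : ¬ ((dlen j : Int) = L' ∧ RC (PySem.Int.toChars j) d.toNat) := by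
        rintro ⟨h1, -⟩
        exact hne h1.symm
      by_cases hdd : d ∣ L' <;> simp [hdd, hni]

theorem R3 (a b L d : Int) (hL : 2 ≤ L) (hd : 1 ≤ d) (hdL : d < L) (hdvd : d ∣ L) :
    ∑ j ∈ Finset.Ico a (b + 1),
        (if (dlen j : Int) = L ∧ RC (PySem.Int.toChars j) d.toNat then j else 0)
    = ∑ p ∈ Finset.Ico ((10 ^ (d.toNat - 1) : Nat) : Int) ((10 ^ d.toNat : Nat) : Int),
        (if a ≤ p * ((repN d.toNat (L.toNat / d.toNat) : Nat) : Int) ∧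
            p * ((repN d.toNat (L.toNat / d.toNat) : Nat) : Int) ≤ b
         then p * ((repN d.toNat (L.toNat / d.toNat) : Nat) : Int) else 0) := by
  have hd0 : 0 < d.toNat := by omega
  have hdvdN : d.toNat ∣ L.toNat := Int.natCast_dvd_natCast.mp
    (by rw [Int.toNat_of_nonneg (by omega : (0:Int) ≤ d),
            Int.toNat_of_nonneg (by omega : (0:Int) ≤ L)]; exact hdvd)
  have hk2 : 2 ≤ L.toNat / d.toNat := by
    obtain ⟨c, hc⟩ := hdvdN
    have hcdiv : L.toNat / d.toNat = c := by rw [hc, Nat.mul_div_cancel_left _ hd0]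
    have hc012 : c = 0 ∨ c = 1 ∨ 2 ≤ c := by omega
    rcases hc012 with h0 | h0 | h0
    · rw [h0] at hc; omega
    · rw [h0] at hc; omega
    · omega
  have hk0' : 0 < repN d.toNat (L.toNat / d.toNat) := repN_pos _ _ (by omega)
  have hrep0 : (0:Int) < ((repN d.toNat (L.toNat / d.toNat) : Nat) : Int) := by exact_mod_cast hk0'
  have key : ∀ j : Int, (dlen j : Int) = L → RC (PySem.Int.toChars j) d.toNat →
      ∃ p : Nat, (10 ^ (d.toNat - 1) ≤ p ∧ p < 10 ^ d.toNat) ∧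
        j = (p : Int) * ((repN d.toNat (L.toNat / d.toNat) : Nat) : Int) := by
    intro j hP1 hP2
    have hj10 : 10 ≤ j := by
      have h2 : 2 ≤ dlen j := by omega
      have h10 : 10 ≤ j.toNat := by
        have h := (Nat.lt_digits_length_iff (k := 1) (by norm_num : (1:Nat) < 10) j.toNat).mp
          (show 1 < (Nat.digits 10 j.toNat).length by unfold dlen at h2; omega)
        simpa using h
      omega
    have hlen : (PySem.Int.toChars j).length = dlen j := len_toChars_pos j (by omega)
    have hdL' : d.toNat < (PySem.Int.toChars j).length := by rw [hlen]; omega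
    obtain ⟨p, hp1, hp2, hpj⟩ := char_fwd j hj10 d.toNat (by omega) hdL' hP2
    refine ⟨p, ⟨hp1, hp2⟩, ?_⟩
    rw [hpj]
    have hLeq : (PySem.Int.toChars j).length = L.toNat := by rw [hlen]; omega
    rw [hLeq]
  rw [← Finset.sum_filter, ← Finset.sum_filter]
  refine Finset.sum_nbij'
    (fun j => j / ((repN d.toNat (L.toNat / d.toNat) : Nat) : Int))
    (fun p => p * ((repN d.toNat (L.toNat / d.toNat) : Nat) : Int)) ?_ ?_ ?_ ?_ ?_
  · intro j hjmem
    simp only [Finset.mem_filter, Finset.mem_Ico] at hjmem ⊢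
    obtain ⟨⟨hja, hjb⟩, hP1, hP2⟩ := hjmem
    obtain ⟨p, ⟨hp1, hp2⟩, hpj⟩ := key j hP1 hP2
    rw [hpj, Int.mul_ediv_cancel _ (by omega)]
    refine ⟨⟨by exact_mod_cast hp1, by exact_mod_cast hp2⟩, ?_, ?_⟩
    · rw [← hpj]; omega
    · rw [← hpj]; omega
  · intro p hpmem
    simp only [Finset.mem_filter, Finset.mem_Ico] at hpmem ⊢
    obtain ⟨⟨hp1, hp2⟩, hna, hnb⟩ := hpmem
    have hp0 : (0:Int) < p := by
      have : (0:Int) < ((10 ^ (d.toNat - 1) : Nat) : Int) := by positivity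
      omega
    have hpn : p * ((repN d.toNat (L.toNat / d.toNat) : Nat) : Int)
        = ((p.toNat * repN d.toNat (L.toNat / d.toNat) : Nat) : Int) := by
      push_cast
      rw [Int.toNat_of_nonneg (by omega)]
    have hp1' : 10 ^ (d.toNat - 1) ≤ p.toNat := by
      have := hp1
      omega
    have hp2' : p.toNat < 10 ^ d.toNat := by omega
    obtain ⟨hdl, hrc⟩ := char_bwd d.toNat (L.toNat / d.toNat) p.toNat hd0 (by omega) hp1' hp2'
    refine ⟨⟨by omega, by omega⟩, ?_, ?_⟩
    · rw [hpn, hdl, Nat.mul_div_cancel' hdvdN]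
      omega
    · rw [hpn]
      exact hrc
  · intro j hjmem
    simp only [Finset.mem_filter, Finset.mem_Ico] at hjmem
    obtain ⟨-, hP1, hP2⟩ := hjmem
    obtain ⟨p, -, hpj⟩ := key j hP1 hP2
    rw [hpj]
    simp only [Int.mul_ediv_cancel _
      (show ((repN d.toNat (L.toNat / d.toNat) : Nat) : Int) ≠ 0 by omega)]
  · intro p hpmem
    simp only [Int.mul_ediv_cancel _
      (show ((repN d.toNat (L.toNat / d.toNat) : Nat) : Int) ≠ 0 by omega)]
  · intro j hjmem
    simp only [Finset.mem_filter, Finset.mem_Ico] at hjmem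
    obtain ⟨-, hP1, hP2⟩ := hjmem
    obtain ⟨p, -, hpj⟩ := key j hP1 hP2
    rw [hpj]
    simp only [Int.mul_ediv_cancel _
      (show ((repN d.toNat (L.toNat / d.toNat) : Nat) : Int) ≠ 0 by omega)]

theorem main_eq (a b : Int) : part2 a b = part2_alt a b := by
  by_cases hb : 10 ≤ b
  · rw [A_sum, B_sum a b hb]
    rw [Finset.sum_congr rfl
      (fun j hj => R1 b j hb (by simp only [Finset.mem_Ico] at hj; omega))]
    rw [Finset.sum_comm]
    apply Finset.sum_congr rfl
    intro L hL
    rw [Finset.sum_comm]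
    apply Finset.sum_congr rfl
    intro d hd
    simp only [Finset.mem_Ico] at hL hd
    by_cases hdvd : d ∣ L
    · simp only [if_pos hdvd]
      exact R3 a b L d (by omega) (by omega) (by omega) hdvd
    · simp [hdvd]
  · rw [A_sum]
    unfold part2_alt
    rw [if_neg (by omega)]
    apply Finset.sum_eq_zero
    intro j hj
    simp only [Finset.mem_Ico] at hj
    exact small_j_zero j (by omega)

-- ===== VERDICT (by name: the statement is the Claim_ definition above) =====
theorem part2_spec : Claim_equal_part2 := by
  intro a b _
  unfold Spec_part2
  exact main_eq a b
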